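-- pv_equiv track=rewrite | github.com/ciscoriordan/dilemma | build/build_diorisis_pairs.py | parse_morph
-- ===== SOURCE A (Python) =====
-- def parse_morph(morph_str, pos):
--     """Parse Diorisis morph string into Dilemma-style tag list.
--
--     Diorisis morph strings look like:
--         'masc acc pl'
--         'pres subj act 1st sg (attic epic doric)'
--         'indeclform (particle)'
--         'fem gen sg (attic doric aeolic)'
--
--     We extract the main features, ignoring dialect markers in parentheses.
--     """
--     if not morph_str:
--         return []
--
--     # Strip dialect info in parentheses
--     clean = morph_str
--     if "(" in clean:
--         clean = clean[:clean.index("(")].strip()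
--
--     parts = clean.lower().split()
--     tags = []
--
--     # Gender
--     for p in parts:
--         if p in ("masc", "masc/neut"):
--             tags.append("masculine")
--             break
--         elif p == "fem":
--             tags.append("feminine")
--             break
--         elif p == "neut":
--             tags.append("neuter")
--             break
--
--     # Number
--     for p in parts:
--         if p == "sg":
--             tags.append("singular")
--             break
--         elif p == "pl":
--             tags.append("plural")
--             break
--         elif p == "dual":
--             tags.append("dual")
--             break
--
--     # Case
--     case_map = {
--         "nom": "nominative", "gen": "genitive", "dat": "dative",
--         "acc": "accusative", "voc": "vocative",
--         "nom/voc/acc": "nominative",  # take first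
--         "nom/voc": "nominative",
--         "nom/acc": "nominative",
--         "gen/dat": "genitive",
--     }
--     for p in parts:
--         if p in case_map:
--             tags.append(case_map[p])
--             break
--
--     # Verbal features: tense
--     tense_map = {
--         "pres": "present", "imperf": "imperfect", "aor": "aorist",
--         "fut": "future", "perf": "perfect", "plup": "pluperfect",
--     }
--     for p in parts:
--         if p in tense_map:
--             tags.append(tense_map[p])
--             break
--
--     # Mood
--     mood_map = {
--         "ind": "indicative", "subj": "subjunctive", "opt": "optative",
--         "imperat": "imperative", "inf": "infinitive", "part": "participle",
--     }
--     for p in parts: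
--         if p in mood_map:
--             tags.append(mood_map[p])
--             break
--
--     # Voice
--     voice_map = {
--         "act": "active", "mid": "middle", "pass": "passive",
--         "mp": "middle",  # medio-passive
--     }
--     for p in parts:
--         if p in voice_map:
--             tags.append(voice_map[p])
--             break
--
--     # Person
--     person_map = {
--         "1st": "first-person", "2nd": "second-person", "3rd": "third-person",
--     }
--     for p in parts:
--         if p in person_map:
--             tags.append(person_map[p])
--             break
--
--     return tags
-- ===== SOURCE B (Python) =====
-- _TOKEN_TABLE = {
--     # gender (category 0)
--     "masc": (0, "masculine"), "masc/neut": (0, "masculine"),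
--     "fem": (0, "feminine"), "neut": (0, "neuter"),
--     # number (category 1)
--     "sg": (1, "singular"), "pl": (1, "plural"), "dual": (1, "dual"),
--     # case (category 2)
--     "nom": (2, "nominative"), "gen": (2, "genitive"), "dat": (2, "dative"),
--     "acc": (2, "accusative"), "voc": (2, "vocative"),
--     "nom/voc/acc": (2, "nominative"), "nom/voc": (2, "nominative"),
--     "nom/acc": (2, "nominative"), "gen/dat": (2, "genitive"),
--     # tense (category 3)
--     "pres": (3, "present"), "imperf": (3, "imperfect"), "aor": (3, "aorist"),
--     "fut": (3, "future"), "perf": (3, "perfect"), "plup": (3, "pluperfect"),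
--     # mood (category 4)
--     "ind": (4, "indicative"), "subj": (4, "subjunctive"), "opt": (4, "optative"),
--     "imperat": (4, "imperative"), "inf": (4, "infinitive"), "part": (4, "participle"),
--     # voice (category 5)
--     "act": (5, "active"), "mid": (5, "middle"), "pass": (5, "passive"),
--     "mp": (5, "middle"),
--     # person (category 6)
--     "1st": (6, "first-person"), "2nd": (6, "second-person"), "3rd": (6, "third-person"),
-- }
--
--
-- def parse_morph(morph_str, pos):
--     """Single-pass variant: one token table, fill each category on first hit."""
--     if not morph_str:
--         return []
--
--     clean = morph_str
--     if "(" in clean: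
--         clean = clean[:clean.index("(")].strip()
--
--     slots = [None] * 7
--     for p in clean.lower().split():
--         hit = _TOKEN_TABLE.get(p)
--         if hit is not None and slots[hit[0]] is None:
--             slots[hit[0]] = hit[1]
--     return [t for t in slots if t is not None]
-- ===== Notes on version B (the rewrite author's own statement) =====
-- stated objective: alternative
-- what changed: Replaces A's seven sequential per-category scans of the token list by a single pass that looks each token up in one combined token->(category,tag) table and fills a 7-slot record on first hit per category, then emits the slots in the fixed order.
import Mathlib
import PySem

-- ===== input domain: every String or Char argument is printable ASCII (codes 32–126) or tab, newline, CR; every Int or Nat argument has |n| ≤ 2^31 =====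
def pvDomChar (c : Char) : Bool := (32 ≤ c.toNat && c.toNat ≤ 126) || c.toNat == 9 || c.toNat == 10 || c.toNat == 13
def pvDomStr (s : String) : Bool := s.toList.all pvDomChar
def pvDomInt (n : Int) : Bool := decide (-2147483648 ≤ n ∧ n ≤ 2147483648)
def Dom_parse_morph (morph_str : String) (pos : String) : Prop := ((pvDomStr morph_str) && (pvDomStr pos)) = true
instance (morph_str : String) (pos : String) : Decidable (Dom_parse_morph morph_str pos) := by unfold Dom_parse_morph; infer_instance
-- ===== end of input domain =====

-- B replaces A's seven per-category scans of `parts` by ONE pass with a combined token table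
-- filling a 7-slot record (objective: alternative decomposition; same dialect-stripping and
-- first-match-per-category semantics).

-- ===== PORT A =====
-- A's seven `for p in parts: … break` loops, each as a first-match recursion returning the tag appended (none = loop fell through).
def pvGenderLoop : List String → Option String
  | [] => none
  | p :: rest =>
    if p = "masc" ∨ p = "masc/neut" then some "masculine"
    else if p = "fem" then some "feminine"
    else if p = "neut" then some "neuter"
    else pvGenderLoop rest

def pvNumberLoop : List String → Option String
  | [] => none
  | p :: rest =>
    if p = "sg" then some "singular"
    else if p = "pl" then some "plural"
    else if p = "dual" then some "dual"
    else pvNumberLoop rest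

def pvCaseMap : PySem.Dict String String := PySem.Dict.mk
  [("nom", "nominative"), ("gen", "genitive"), ("dat", "dative"),
   ("acc", "accusative"), ("voc", "vocative"),
   ("nom/voc/acc", "nominative"), ("nom/voc", "nominative"),
   ("nom/acc", "nominative"), ("gen/dat", "genitive")]

def pvTenseMap : PySem.Dict String String := PySem.Dict.mk
  [("pres", "present"), ("imperf", "imperfect"), ("aor", "aorist"),
   ("fut", "future"), ("perf", "perfect"), ("plup", "pluperfect")]

def pvMoodMap : PySem.Dict String String := PySem.Dict.mk
  [("ind", "indicative"), ("subj", "subjunctive"), ("opt", "optative"),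
   ("imperat", "imperative"), ("inf", "infinitive"), ("part", "participle")]

def pvVoiceMap : PySem.Dict String String := PySem.Dict.mk
  [("act", "active"), ("mid", "middle"), ("pass", "passive"), ("mp", "middle")]

def pvPersonMap : PySem.Dict String String := PySem.Dict.mk
  [("1st", "first-person"), ("2nd", "second-person"), ("3rd", "third-person")]

-- `for p in parts: if p in m: tags.append(m[p]); break`
def pvMapLoop (m : PySem.Dict String String) : List String → Option String
  | [] => none
  | p :: rest =>
    match m.get? p with
    | some t => some t
    | none => pvMapLoop m rest

def parse_morph (morph_str : String) (pos : String) : List String :=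
  if morph_str = "" then []
  else
    let clean := morph_str
    -- `clean.index("(")` is guarded by `"(" in clean`, so it equals `clean.find("(")` here
    let clean := if PySem.Str.isIn "(" clean then
        PySem.Str.strip (PySem.Str.slice clean none (some (PySem.Str.find clean "(")))
      else clean
    let parts := PySem.Str.split₀ (PySem.Str.lower clean)
    let tags : List String := []
    let tags := tags ++ (pvGenderLoop parts).toList
    let tags := tags ++ (pvNumberLoop parts).toList
    let tags := tags ++ (pvMapLoop pvCaseMap parts).toList
    let tags := tags ++ (pvMapLoop pvTenseMap parts).toList
    let tags := tags ++ (pvMapLoop pvMoodMap parts).toList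
    let tags := tags ++ (pvMapLoop pvVoiceMap parts).toList
    let tags := tags ++ (pvMapLoop pvPersonMap parts).toList
    tags

-- ===== PORT B =====
-- Source B's single token table: token ↦ (category index, output tag)
def pvTokenTable : PySem.Dict String (Int × String) := PySem.Dict.mk
  [("masc", (0, "masculine")), ("masc/neut", (0, "masculine")),
   ("fem", (0, "feminine")), ("neut", (0, "neuter")),
   ("sg", (1, "singular")), ("pl", (1, "plural")), ("dual", (1, "dual")),
   ("nom", (2, "nominative")), ("gen", (2, "genitive")), ("dat", (2, "dative")),
   ("acc", (2, "accusative")), ("voc", (2, "vocative")),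
   ("nom/voc/acc", (2, "nominative")), ("nom/voc", (2, "nominative")),
   ("nom/acc", (2, "nominative")), ("gen/dat", (2, "genitive")),
   ("pres", (3, "present")), ("imperf", (3, "imperfect")), ("aor", (3, "aorist")),
   ("fut", (3, "future")), ("perf", (3, "perfect")), ("plup", (3, "pluperfect")),
   ("ind", (4, "indicative")), ("subj", (4, "subjunctive")), ("opt", (4, "optative")),
   ("imperat", (4, "imperative")), ("inf", (4, "infinitive")), ("part", (4, "participle")),
   ("act", (5, "active")), ("mid", (5, "middle")), ("pass", (5, "passive")),
   ("mp", (5, "middle")),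
   ("1st", (6, "first-person")), ("2nd", (6, "second-person")), ("3rd", (6, "third-person"))]

-- the 7 slots `[None]*7` as a record of options
abbrev PvSlots := Option String × Option String × Option String × Option String ×
  Option String × Option String × Option String

-- `slots[i] = t` if `slots[i] is None` (i is one of 0..6 from the table)
def pvFill (s : PvSlots) (i : Int) (t : String) : PvSlots :=
  if i = 0 then (if s.1 = none then (some t, s.2) else s)
  else if i = 1 then (if s.2.1 = none then (s.1, some t, s.2.2) else s)
  else if i = 2 then (if s.2.2.1 = none then (s.1, s.2.1, some t, s.2.2.2) else s)
  else if i = 3 then (if s.2.2.2.1 = none then (s.1, s.2.1, s.2.2.1, some t, s.2.2.2.2) else s)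
  else if i = 4 then (if s.2.2.2.2.1 = none then (s.1, s.2.1, s.2.2.1, s.2.2.2.1, some t, s.2.2.2.2.2) else s)
  else if i = 5 then (if s.2.2.2.2.2.1 = none then (s.1, s.2.1, s.2.2.1, s.2.2.2.1, s.2.2.2.2.1, some t, s.2.2.2.2.2.2) else s)
  else (if s.2.2.2.2.2.2 = none then (s.1, s.2.1, s.2.2.1, s.2.2.2.1, s.2.2.2.2.1, s.2.2.2.2.2.1, some t) else s)

-- the body of Source B's single loop over `parts`
def pvStep (s : PvSlots) (p : String) : PvSlots :=
  match pvTokenTable.get? p with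
  | none => s
  | some (i, t) => pvFill s i t

def parse_morph_alt (morph_str : String) (pos : String) : List String :=
  if morph_str = "" then []
  else
    let clean := morph_str
    let clean := if PySem.Str.isIn "(" clean then
        PySem.Str.strip (PySem.Str.slice clean none (some (PySem.Str.find clean "(")))
      else clean
    let s := (PySem.Str.split₀ (PySem.Str.lower clean)).foldl pvStep
      (none, none, none, none, none, none, none)
    -- `[t for t in slots if t is not None]`
    [s.1, s.2.1, s.2.2.1, s.2.2.2.1, s.2.2.2.2.1, s.2.2.2.2.2.1, s.2.2.2.2.2.2].flatMap Option.toList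

-- ===== PRECONDITION & SPEC =====
def Spec_parse_morph (morph_str : String) (pos : String) (out : List String) : Prop := out = parse_morph_alt morph_str pos
instance (morph_str : String) (pos : String) (out : List String) : Decidable (Spec_parse_morph morph_str pos out) := by unfold Spec_parse_morph; infer_instance

-- ===== CLAIM (what is proved, stated in full; the proofs are below) =====
def Claim_equal_parse_morph : Prop := ∀ (morph_str : String) (pos : String), Dom_parse_morph morph_str pos → Spec_parse_morph morph_str pos (parse_morph morph_str pos)

-- ===== LEMMAS AND PROOFS =====

-- first-match of the first component, as Python's `or`-style fallback
def pvOr (a b : Option String) : Option String := if a = none then b else a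

@[simp] theorem pvOr_some (t : String) (b : Option String) : pvOr (some t) b = some t := rfl
@[simp] theorem pvOr_none (b : Option String) : pvOr none b = b := rfl
@[simp] theorem pvOr_none_right (a : Option String) : pvOr a none = a := by cases a <;> rfl

-- all tokens the table (and A's seven scans together) recognise
def pvKeys : List String := ["masc", "masc/neut", "fem", "neut", "sg", "pl", "dual", "nom", "gen", "dat", "acc", "voc", "nom/voc/acc", "nom/voc", "nom/acc", "gen/dat", "pres", "imperf", "aor", "fut", "perf", "plup", "ind", "subj", "opt", "imperat", "inf", "part", "act", "mid", "pass", "mp", "1st", "2nd", "3rd"]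

-- the single pass fills each slot with exactly the first match of its category's scan
set_option maxHeartbeats 2000000 in
theorem pvFold_eq (parts : List String) (s : PvSlots) :
    parts.foldl pvStep s =
      (pvOr s.1 (pvGenderLoop parts),
       pvOr s.2.1 (pvNumberLoop parts),
       pvOr s.2.2.1 (pvMapLoop pvCaseMap parts),
       pvOr s.2.2.2.1 (pvMapLoop pvTenseMap parts),
       pvOr s.2.2.2.2.1 (pvMapLoop pvMoodMap parts),
       pvOr s.2.2.2.2.2.1 (pvMapLoop pvVoiceMap parts),
       pvOr s.2.2.2.2.2.2 (pvMapLoop pvPersonMap parts)) := by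
  induction parts generalizing s with
  | nil =>
    simp [pvGenderLoop, pvNumberLoop, pvMapLoop]
  | cons p rest ih =>
    obtain ⟨a, b, c, d, e, f, g⟩ := s
    rw [List.foldl_cons, ih]
    by_cases hp : p ∈ pvKeys
    · simp only [pvKeys, List.mem_cons, List.not_mem_nil, or_false] at hp
      rcases hp with rfl|rfl|rfl|rfl|rfl|rfl|rfl|rfl|rfl|rfl|rfl|rfl|rfl|rfl|rfl|rfl|rfl|rfl|rfl|rfl|rfl|rfl|rfl|rfl|rfl|rfl|rfl|rfl|rfl|rfl|rfl|rfl|rfl|rfl|rfl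
      · -- "masc"
        have h0 : pvTokenTable.get? "masc" = some (0, "masculine") := rfl
        have h1 : pvCaseMap.get? "masc" = none := rfl
        have h2 : pvTenseMap.get? "masc" = none := rfl
        have h3 : pvMoodMap.get? "masc" = none := rfl
        have h4 : pvVoiceMap.get? "masc" = none := rfl
        have h5 : pvPersonMap.get? "masc" = none := rfl
        simp only [pvStep, pvFill, pvGenderLoop, pvNumberLoop, pvMapLoop, h0, h1, h2, h3, h4, h5]
        simp
        split_ifs <;> simp_all [pvOr]
      · -- "masc/neut"
        have h0 : pvTokenTable.get? "masc/neut" = some (0, "masculine") := rfl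
        have h1 : pvCaseMap.get? "masc/neut" = none := rfl
        have h2 : pvTenseMap.get? "masc/neut" = none := rfl
        have h3 : pvMoodMap.get? "masc/neut" = none := rfl
        have h4 : pvVoiceMap.get? "masc/neut" = none := rfl
        have h5 : pvPersonMap.get? "masc/neut" = none := rfl
        simp only [pvStep, pvFill, pvGenderLoop, pvNumberLoop, pvMapLoop, h0, h1, h2, h3, h4, h5]
        simp
        split_ifs <;> simp_all [pvOr]
      · -- "fem"
        have h0 : pvTokenTable.get? "fem" = some (0, "feminine") := rfl
        have h1 : pvCaseMap.get? "fem" = none := rfl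
        have h2 : pvTenseMap.get? "fem" = none := rfl
        have h3 : pvMoodMap.get? "fem" = none := rfl
        have h4 : pvVoiceMap.get? "fem" = none := rfl
        have h5 : pvPersonMap.get? "fem" = none := rfl
        simp only [pvStep, pvFill, pvGenderLoop, pvNumberLoop, pvMapLoop, h0, h1, h2, h3, h4, h5]
        simp
        split_ifs <;> simp_all [pvOr]
      · -- "neut"
        have h0 : pvTokenTable.get? "neut" = some (0, "neuter") := rfl
        have h1 : pvCaseMap.get? "neut" = none := rfl
        have h2 : pvTenseMap.get? "neut" = none := rfl
        have h3 : pvMoodMap.get? "neut" = none := rfl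
        have h4 : pvVoiceMap.get? "neut" = none := rfl
        have h5 : pvPersonMap.get? "neut" = none := rfl
        simp only [pvStep, pvFill, pvGenderLoop, pvNumberLoop, pvMapLoop, h0, h1, h2, h3, h4, h5]
        simp
        split_ifs <;> simp_all [pvOr]
      · -- "sg"
        have h0 : pvTokenTable.get? "sg" = some (1, "singular") := rfl
        have h1 : pvCaseMap.get? "sg" = none := rfl
        have h2 : pvTenseMap.get? "sg" = none := rfl
        have h3 : pvMoodMap.get? "sg" = none := rfl
        have h4 : pvVoiceMap.get? "sg" = none := rfl
        have h5 : pvPersonMap.get? "sg" = none := rfl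
        simp only [pvStep, pvFill, pvGenderLoop, pvNumberLoop, pvMapLoop, h0, h1, h2, h3, h4, h5]
        simp
        split_ifs <;> simp_all [pvOr]
      · -- "pl"
        have h0 : pvTokenTable.get? "pl" = some (1, "plural") := rfl
        have h1 : pvCaseMap.get? "pl" = none := rfl
        have h2 : pvTenseMap.get? "pl" = none := rfl
        have h3 : pvMoodMap.get? "pl" = none := rfl
        have h4 : pvVoiceMap.get? "pl" = none := rfl
        have h5 : pvPersonMap.get? "pl" = none := rfl
        simp only [pvStep, pvFill, pvGenderLoop, pvNumberLoop, pvMapLoop, h0, h1, h2, h3, h4, h5]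
        simp
        split_ifs <;> simp_all [pvOr]
      · -- "dual"
        have h0 : pvTokenTable.get? "dual" = some (1, "dual") := rfl
        have h1 : pvCaseMap.get? "dual" = none := rfl
        have h2 : pvTenseMap.get? "dual" = none := rfl
        have h3 : pvMoodMap.get? "dual" = none := rfl
        have h4 : pvVoiceMap.get? "dual" = none := rfl
        have h5 : pvPersonMap.get? "dual" = none := rfl
        simp only [pvStep, pvFill, pvGenderLoop, pvNumberLoop, pvMapLoop, h0, h1, h2, h3, h4, h5]
        simp
        split_ifs <;> simp_all [pvOr]
      · -- "nom"
        have h0 : pvTokenTable.get? "nom" = some (2, "nominative") := rfl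
        have h1 : pvCaseMap.get? "nom" = some "nominative" := rfl
        have h2 : pvTenseMap.get? "nom" = none := rfl
        have h3 : pvMoodMap.get? "nom" = none := rfl
        have h4 : pvVoiceMap.get? "nom" = none := rfl
        have h5 : pvPersonMap.get? "nom" = none := rfl
        simp only [pvStep, pvFill, pvGenderLoop, pvNumberLoop, pvMapLoop, h0, h1, h2, h3, h4, h5]
        simp
        split_ifs <;> simp_all [pvOr]
      · -- "gen"
        have h0 : pvTokenTable.get? "gen" = some (2, "genitive") := rfl
        have h1 : pvCaseMap.get? "gen" = some "genitive" := rfl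
        have h2 : pvTenseMap.get? "gen" = none := rfl
        have h3 : pvMoodMap.get? "gen" = none := rfl
        have h4 : pvVoiceMap.get? "gen" = none := rfl
        have h5 : pvPersonMap.get? "gen" = none := rfl
        simp only [pvStep, pvFill, pvGenderLoop, pvNumberLoop, pvMapLoop, h0, h1, h2, h3, h4, h5]
        simp
        split_ifs <;> simp_all [pvOr]
      · -- "dat"
        have h0 : pvTokenTable.get? "dat" = some (2, "dative") := rfl
        have h1 : pvCaseMap.get? "dat" = some "dative" := rfl
        have h2 : pvTenseMap.get? "dat" = none := rfl
        have h3 : pvMoodMap.get? "dat" = none := rfl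
        have h4 : pvVoiceMap.get? "dat" = none := rfl
        have h5 : pvPersonMap.get? "dat" = none := rfl
        simp only [pvStep, pvFill, pvGenderLoop, pvNumberLoop, pvMapLoop, h0, h1, h2, h3, h4, h5]
        simp
        split_ifs <;> simp_all [pvOr]
      · -- "acc"
        have h0 : pvTokenTable.get? "acc" = some (2, "accusative") := rfl
        have h1 : pvCaseMap.get? "acc" = some "accusative" := rfl
        have h2 : pvTenseMap.get? "acc" = none := rfl
        have h3 : pvMoodMap.get? "acc" = none := rfl
        have h4 : pvVoiceMap.get? "acc" = none := rfl
        have h5 : pvPersonMap.get? "acc" = none := rfl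
        simp only [pvStep, pvFill, pvGenderLoop, pvNumberLoop, pvMapLoop, h0, h1, h2, h3, h4, h5]
        simp
        split_ifs <;> simp_all [pvOr]
      · -- "voc"
        have h0 : pvTokenTable.get? "voc" = some (2, "vocative") := rfl
        have h1 : pvCaseMap.get? "voc" = some "vocative" := rfl
        have h2 : pvTenseMap.get? "voc" = none := rfl
        have h3 : pvMoodMap.get? "voc" = none := rfl
        have h4 : pvVoiceMap.get? "voc" = none := rfl
        have h5 : pvPersonMap.get? "voc" = none := rfl
        simp only [pvStep, pvFill, pvGenderLoop, pvNumberLoop, pvMapLoop, h0, h1, h2, h3, h4, h5]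
        simp
        split_ifs <;> simp_all [pvOr]
      · -- "nom/voc/acc"
        have h0 : pvTokenTable.get? "nom/voc/acc" = some (2, "nominative") := rfl
        have h1 : pvCaseMap.get? "nom/voc/acc" = some "nominative" := rfl
        have h2 : pvTenseMap.get? "nom/voc/acc" = none := rfl
        have h3 : pvMoodMap.get? "nom/voc/acc" = none := rfl
        have h4 : pvVoiceMap.get? "nom/voc/acc" = none := rfl
        have h5 : pvPersonMap.get? "nom/voc/acc" = none := rfl
        simp only [pvStep, pvFill, pvGenderLoop, pvNumberLoop, pvMapLoop, h0, h1, h2, h3, h4, h5]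
        simp
        split_ifs <;> simp_all [pvOr]
      · -- "nom/voc"
        have h0 : pvTokenTable.get? "nom/voc" = some (2, "nominative") := rfl
        have h1 : pvCaseMap.get? "nom/voc" = some "nominative" := rfl
        have h2 : pvTenseMap.get? "nom/voc" = none := rfl
        have h3 : pvMoodMap.get? "nom/voc" = none := rfl
        have h4 : pvVoiceMap.get? "nom/voc" = none := rfl
        have h5 : pvPersonMap.get? "nom/voc" = none := rfl
        simp only [pvStep, pvFill, pvGenderLoop, pvNumberLoop, pvMapLoop, h0, h1, h2, h3, h4, h5]
        simp
        split_ifs <;> simp_all [pvOr]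
      · -- "nom/acc"
        have h0 : pvTokenTable.get? "nom/acc" = some (2, "nominative") := rfl
        have h1 : pvCaseMap.get? "nom/acc" = some "nominative" := rfl
        have h2 : pvTenseMap.get? "nom/acc" = none := rfl
        have h3 : pvMoodMap.get? "nom/acc" = none := rfl
        have h4 : pvVoiceMap.get? "nom/acc" = none := rfl
        have h5 : pvPersonMap.get? "nom/acc" = none := rfl
        simp only [pvStep, pvFill, pvGenderLoop, pvNumberLoop, pvMapLoop, h0, h1, h2, h3, h4, h5]
        simp
        split_ifs <;> simp_all [pvOr]
      · -- "gen/dat"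
        have h0 : pvTokenTable.get? "gen/dat" = some (2, "genitive") := rfl
        have h1 : pvCaseMap.get? "gen/dat" = some "genitive" := rfl
        have h2 : pvTenseMap.get? "gen/dat" = none := rfl
        have h3 : pvMoodMap.get? "gen/dat" = none := rfl
        have h4 : pvVoiceMap.get? "gen/dat" = none := rfl
        have h5 : pvPersonMap.get? "gen/dat" = none := rfl
        simp only [pvStep, pvFill, pvGenderLoop, pvNumberLoop, pvMapLoop, h0, h1, h2, h3, h4, h5]
        simp
        split_ifs <;> simp_all [pvOr]
      · -- "pres"
        have h0 : pvTokenTable.get? "pres" = some (3, "present") := rfl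
        have h1 : pvCaseMap.get? "pres" = none := rfl
        have h2 : pvTenseMap.get? "pres" = some "present" := rfl
        have h3 : pvMoodMap.get? "pres" = none := rfl
        have h4 : pvVoiceMap.get? "pres" = none := rfl
        have h5 : pvPersonMap.get? "pres" = none := rfl
        simp only [pvStep, pvFill, pvGenderLoop, pvNumberLoop, pvMapLoop, h0, h1, h2, h3, h4, h5]
        simp
        split_ifs <;> simp_all [pvOr]
      · -- "imperf"
        have h0 : pvTokenTable.get? "imperf" = some (3, "imperfect") := rfl
        have h1 : pvCaseMap.get? "imperf" = none := rfl
        have h2 : pvTenseMap.get? "imperf" = some "imperfect" := rfl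
        have h3 : pvMoodMap.get? "imperf" = none := rfl
        have h4 : pvVoiceMap.get? "imperf" = none := rfl
        have h5 : pvPersonMap.get? "imperf" = none := rfl
        simp only [pvStep, pvFill, pvGenderLoop, pvNumberLoop, pvMapLoop, h0, h1, h2, h3, h4, h5]
        simp
        split_ifs <;> simp_all [pvOr]
      · -- "aor"
        have h0 : pvTokenTable.get? "aor" = some (3, "aorist") := rfl
        have h1 : pvCaseMap.get? "aor" = none := rfl
        have h2 : pvTenseMap.get? "aor" = some "aorist" := rfl
        have h3 : pvMoodMap.get? "aor" = none := rfl
        have h4 : pvVoiceMap.get? "aor" = none := rfl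
        have h5 : pvPersonMap.get? "aor" = none := rfl
        simp only [pvStep, pvFill, pvGenderLoop, pvNumberLoop, pvMapLoop, h0, h1, h2, h3, h4, h5]
        simp
        split_ifs <;> simp_all [pvOr]
      · -- "fut"
        have h0 : pvTokenTable.get? "fut" = some (3, "future") := rfl
        have h1 : pvCaseMap.get? "fut" = none := rfl
        have h2 : pvTenseMap.get? "fut" = some "future" := rfl
        have h3 : pvMoodMap.get? "fut" = none := rfl
        have h4 : pvVoiceMap.get? "fut" = none := rfl
        have h5 : pvPersonMap.get? "fut" = none := rfl
        simp only [pvStep, pvFill, pvGenderLoop, pvNumberLoop, pvMapLoop, h0, h1, h2, h3, h4, h5]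
        simp
        split_ifs <;> simp_all [pvOr]
      · -- "perf"
        have h0 : pvTokenTable.get? "perf" = some (3, "perfect") := rfl
        have h1 : pvCaseMap.get? "perf" = none := rfl
        have h2 : pvTenseMap.get? "perf" = some "perfect" := rfl
        have h3 : pvMoodMap.get? "perf" = none := rfl
        have h4 : pvVoiceMap.get? "perf" = none := rfl
        have h5 : pvPersonMap.get? "perf" = none := rfl
        simp only [pvStep, pvFill, pvGenderLoop, pvNumberLoop, pvMapLoop, h0, h1, h2, h3, h4, h5]
        simp
        split_ifs <;> simp_all [pvOr]
      · -- "plup"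
        have h0 : pvTokenTable.get? "plup" = some (3, "pluperfect") := rfl
        have h1 : pvCaseMap.get? "plup" = none := rfl
        have h2 : pvTenseMap.get? "plup" = some "pluperfect" := rfl
        have h3 : pvMoodMap.get? "plup" = none := rfl
        have h4 : pvVoiceMap.get? "plup" = none := rfl
        have h5 : pvPersonMap.get? "plup" = none := rfl
        simp only [pvStep, pvFill, pvGenderLoop, pvNumberLoop, pvMapLoop, h0, h1, h2, h3, h4, h5]
        simp
        split_ifs <;> simp_all [pvOr]
      · -- "ind"
        have h0 : pvTokenTable.get? "ind" = some (4, "indicative") := rfl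
        have h1 : pvCaseMap.get? "ind" = none := rfl
        have h2 : pvTenseMap.get? "ind" = none := rfl
        have h3 : pvMoodMap.get? "ind" = some "indicative" := rfl
        have h4 : pvVoiceMap.get? "ind" = none := rfl
        have h5 : pvPersonMap.get? "ind" = none := rfl
        simp only [pvStep, pvFill, pvGenderLoop, pvNumberLoop, pvMapLoop, h0, h1, h2, h3, h4, h5]
        simp
        split_ifs <;> simp_all [pvOr]
      · -- "subj"
        have h0 : pvTokenTable.get? "subj" = some (4, "subjunctive") := rfl
        have h1 : pvCaseMap.get? "subj" = none := rfl
        have h2 : pvTenseMap.get? "subj" = none := rfl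
        have h3 : pvMoodMap.get? "subj" = some "subjunctive" := rfl
        have h4 : pvVoiceMap.get? "subj" = none := rfl
        have h5 : pvPersonMap.get? "subj" = none := rfl
        simp only [pvStep, pvFill, pvGenderLoop, pvNumberLoop, pvMapLoop, h0, h1, h2, h3, h4, h5]
        simp
        split_ifs <;> simp_all [pvOr]
      · -- "opt"
        have h0 : pvTokenTable.get? "opt" = some (4, "optative") := rfl
        have h1 : pvCaseMap.get? "opt" = none := rfl
        have h2 : pvTenseMap.get? "opt" = none := rfl
        have h3 : pvMoodMap.get? "opt" = some "optative" := rfl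
        have h4 : pvVoiceMap.get? "opt" = none := rfl
        have h5 : pvPersonMap.get? "opt" = none := rfl
        simp only [pvStep, pvFill, pvGenderLoop, pvNumberLoop, pvMapLoop, h0, h1, h2, h3, h4, h5]
        simp
        split_ifs <;> simp_all [pvOr]
      · -- "imperat"
        have h0 : pvTokenTable.get? "imperat" = some (4, "imperative") := rfl
        have h1 : pvCaseMap.get? "imperat" = none := rfl
        have h2 : pvTenseMap.get? "imperat" = none := rfl
        have h3 : pvMoodMap.get? "imperat" = some "imperative" := rfl
        have h4 : pvVoiceMap.get? "imperat" = none := rfl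
        have h5 : pvPersonMap.get? "imperat" = none := rfl
        simp only [pvStep, pvFill, pvGenderLoop, pvNumberLoop, pvMapLoop, h0, h1, h2, h3, h4, h5]
        simp
        split_ifs <;> simp_all [pvOr]
      · -- "inf"
        have h0 : pvTokenTable.get? "inf" = some (4, "infinitive") := rfl
        have h1 : pvCaseMap.get? "inf" = none := rfl
        have h2 : pvTenseMap.get? "inf" = none := rfl
        have h3 : pvMoodMap.get? "inf" = some "infinitive" := rfl
        have h4 : pvVoiceMap.get? "inf" = none := rfl
        have h5 : pvPersonMap.get? "inf" = none := rfl
        simp only [pvStep, pvFill, pvGenderLoop, pvNumberLoop, pvMapLoop, h0, h1, h2, h3, h4, h5]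
        simp
        split_ifs <;> simp_all [pvOr]
      · -- "part"
        have h0 : pvTokenTable.get? "part" = some (4, "participle") := rfl
        have h1 : pvCaseMap.get? "part" = none := rfl
        have h2 : pvTenseMap.get? "part" = none := rfl
        have h3 : pvMoodMap.get? "part" = some "participle" := rfl
        have h4 : pvVoiceMap.get? "part" = none := rfl
        have h5 : pvPersonMap.get? "part" = none := rfl
        simp only [pvStep, pvFill, pvGenderLoop, pvNumberLoop, pvMapLoop, h0, h1, h2, h3, h4, h5]
        simp
        split_ifs <;> simp_all [pvOr]
      · -- "act"
        have h0 : pvTokenTable.get? "act" = some (5, "active") := rfl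
        have h1 : pvCaseMap.get? "act" = none := rfl
        have h2 : pvTenseMap.get? "act" = none := rfl
        have h3 : pvMoodMap.get? "act" = none := rfl
        have h4 : pvVoiceMap.get? "act" = some "active" := rfl
        have h5 : pvPersonMap.get? "act" = none := rfl
        simp only [pvStep, pvFill, pvGenderLoop, pvNumberLoop, pvMapLoop, h0, h1, h2, h3, h4, h5]
        simp
        split_ifs <;> simp_all [pvOr]
      · -- "mid"
        have h0 : pvTokenTable.get? "mid" = some (5, "middle") := rfl
        have h1 : pvCaseMap.get? "mid" = none := rfl
        have h2 : pvTenseMap.get? "mid" = none := rfl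
        have h3 : pvMoodMap.get? "mid" = none := rfl
        have h4 : pvVoiceMap.get? "mid" = some "middle" := rfl
        have h5 : pvPersonMap.get? "mid" = none := rfl
        simp only [pvStep, pvFill, pvGenderLoop, pvNumberLoop, pvMapLoop, h0, h1, h2, h3, h4, h5]
        simp
        split_ifs <;> simp_all [pvOr]
      · -- "pass"
        have h0 : pvTokenTable.get? "pass" = some (5, "passive") := rfl
        have h1 : pvCaseMap.get? "pass" = none := rfl
        have h2 : pvTenseMap.get? "pass" = none := rfl
        have h3 : pvMoodMap.get? "pass" = none := rfl
        have h4 : pvVoiceMap.get? "pass" = some "passive" := rfl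
        have h5 : pvPersonMap.get? "pass" = none := rfl
        simp only [pvStep, pvFill, pvGenderLoop, pvNumberLoop, pvMapLoop, h0, h1, h2, h3, h4, h5]
        simp
        split_ifs <;> simp_all [pvOr]
      · -- "mp"
        have h0 : pvTokenTable.get? "mp" = some (5, "middle") := rfl
        have h1 : pvCaseMap.get? "mp" = none := rfl
        have h2 : pvTenseMap.get? "mp" = none := rfl
        have h3 : pvMoodMap.get? "mp" = none := rfl
        have h4 : pvVoiceMap.get? "mp" = some "middle" := rfl
        have h5 : pvPersonMap.get? "mp" = none := rfl
        simp only [pvStep, pvFill, pvGenderLoop, pvNumberLoop, pvMapLoop, h0, h1, h2, h3, h4, h5]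
        simp
        split_ifs <;> simp_all [pvOr]
      · -- "1st"
        have h0 : pvTokenTable.get? "1st" = some (6, "first-person") := rfl
        have h1 : pvCaseMap.get? "1st" = none := rfl
        have h2 : pvTenseMap.get? "1st" = none := rfl
        have h3 : pvMoodMap.get? "1st" = none := rfl
        have h4 : pvVoiceMap.get? "1st" = none := rfl
        have h5 : pvPersonMap.get? "1st" = some "first-person" := rfl
        simp only [pvStep, pvFill, pvGenderLoop, pvNumberLoop, pvMapLoop, h0, h1, h2, h3, h4, h5]
        simp
        split_ifs <;> simp_all [pvOr]
      · -- "2nd"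
        have h0 : pvTokenTable.get? "2nd" = some (6, "second-person") := rfl
        have h1 : pvCaseMap.get? "2nd" = none := rfl
        have h2 : pvTenseMap.get? "2nd" = none := rfl
        have h3 : pvMoodMap.get? "2nd" = none := rfl
        have h4 : pvVoiceMap.get? "2nd" = none := rfl
        have h5 : pvPersonMap.get? "2nd" = some "second-person" := rfl
        simp only [pvStep, pvFill, pvGenderLoop, pvNumberLoop, pvMapLoop, h0, h1, h2, h3, h4, h5]
        simp
        split_ifs <;> simp_all [pvOr]
      · -- "3rd"
        have h0 : pvTokenTable.get? "3rd" = some (6, "third-person") := rfl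
        have h1 : pvCaseMap.get? "3rd" = none := rfl
        have h2 : pvTenseMap.get? "3rd" = none := rfl
        have h3 : pvMoodMap.get? "3rd" = none := rfl
        have h4 : pvVoiceMap.get? "3rd" = none := rfl
        have h5 : pvPersonMap.get? "3rd" = some "third-person" := rfl
        simp only [pvStep, pvFill, pvGenderLoop, pvNumberLoop, pvMapLoop, h0, h1, h2, h3, h4, h5]
        simp
        split_ifs <;> simp_all [pvOr]
    · have hA : ∀ q : String, q ∈ pvKeys → ¬(q = p) := fun q hq he => hp (by rwa [he] at hq)
      have hB : ∀ q : String, q ∈ pvKeys → ¬(p = q) := fun q hq he => hp (by rwa [← he] at hq)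
      simp [pvStep, pvTokenTable, pvCaseMap, pvTenseMap, pvMoodMap, pvVoiceMap,
        pvPersonMap, pvGenderLoop, pvNumberLoop, pvMapLoop, PySem.Dict.get?, pvKeys, hA, hB]

-- ===== VERDICT (by name: the statement is the Claim_ definition above) =====
theorem parse_morph_spec : Claim_equal_parse_morph := by
  intro morph_str pos _
  unfold Spec_parse_morph parse_morph parse_morph_alt
  by_cases h : morph_str = ""
  · simp [h]
  · simp only [h, if_false]
    rw [pvFold_eq]
    simp [List.flatMap]
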